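-- pv_equiv track=rewrite | github.com/Aleks-Ti/AlgorithmsProblem | Yandex_Contecst/block_1/Задачки/dexterity_debug.py | games
-- ===== SOURCE A (Python) =====
-- from collections import Counter
--
-- def games(game_condition, playing_field):
--     if playing_field == '':
--         return '0'
--     result = 0
--     for value in Counter(playing_field).values():
--         if int(value) <= game_condition * 2:
--             result += 1
--     return result
-- ===== SOURCE B (Python) =====
-- def games(game_condition, playing_field):
--     if playing_field == '':
--         return '0'
--     limit = game_condition * 2
--     s = sorted(playing_field)
--     cur = s[0]
--     run = 0
--     result = 0
--     for ch in s:
--         if ch == cur: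
--             run += 1
--         else:
--             if run <= limit:
--                 result += 1
--             cur = ch
--             run = 1
--     if run <= limit:
--         result += 1
--     return result
-- ===== Notes on version B (the rewrite author's own statement) =====
-- stated objective: alternative
-- what changed: B replaces the Counter frequency dictionary by sorting the string and counting, in one scan, the maximal runs whose length is at most game_condition*2.
-- outside the precondition, e.g. on games(1, ''): A returns '0', B returns '0'
import Mathlib
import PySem

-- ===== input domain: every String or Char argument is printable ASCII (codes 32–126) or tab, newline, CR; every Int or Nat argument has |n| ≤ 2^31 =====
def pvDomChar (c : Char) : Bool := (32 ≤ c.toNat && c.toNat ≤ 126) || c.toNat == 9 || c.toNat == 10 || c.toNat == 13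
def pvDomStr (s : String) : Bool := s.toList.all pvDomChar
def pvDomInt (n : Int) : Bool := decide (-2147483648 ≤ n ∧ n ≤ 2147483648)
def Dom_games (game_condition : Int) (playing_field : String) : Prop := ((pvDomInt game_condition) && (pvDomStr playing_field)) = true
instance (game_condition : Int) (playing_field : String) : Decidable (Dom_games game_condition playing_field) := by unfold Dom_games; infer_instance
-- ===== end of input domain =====

-- B sorts the string and counts, in one scan, the maximal runs of equal characters
-- whose length is at most game_condition*2, instead of building a Counter (objective: alternative).


-- ===== PORT A =====
-- On '' Python A returns the STRING '0' (not an int); that input is excluded by Pre_games.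
def games (game_condition : Int) (playing_field : String) : Int :=
  if playing_field = "" then 0
  else
    (PySem.Dict.counter playing_field.toList).values.foldl
      (fun result value => if value ≤ game_condition * 2 then result + 1 else result) 0

-- ===== PORT B =====
-- the scan over sorted(playing_field): cur = current character, run = its run length so far
def gamesLoop (limit : Int) (cur : Char) (run result : Int) : List Char → Int
  | [] => if run ≤ limit then result + 1 else result
  | ch :: rest =>
      if ch = cur then gamesLoop limit cur (run + 1) result rest
      else gamesLoop limit ch 1 (if run ≤ limit then result + 1 else result) rest

-- On '' Python B returns the STRING '0' (not an int); that input is excluded by Pre_games.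
def games_alt (game_condition : Int) (playing_field : String) : Int :=
  if playing_field = "" then 0
  else
    match PySem.List.sorted playing_field.toList (fun c => c) false with
    | [] => 0  -- unreachable: playing_field ≠ ""
    | c0 :: _ =>
        gamesLoop (game_condition * 2) c0 0 0
          (PySem.List.sorted playing_field.toList (fun c => c) false)

-- ===== PRECONDITION & SPEC =====
-- Pre_ excludes only the empty string, where Python A (and B) return the STRING '0',
-- which is not a value of the declared return type Int.
def Pre_games (game_condition : Int) (playing_field : String) : Prop := playing_field ≠ ""
instance (game_condition : Int) (playing_field : String) : Decidable (Pre_games game_condition playing_field) := by unfold Pre_games; infer_instance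
def pvWitness_games : Int × String := (2, "abacus")

def Spec_games (game_condition : Int) (playing_field : String) (out : Int) : Prop := out = games_alt game_condition playing_field
instance (game_condition : Int) (playing_field : String) (out : Int) : Decidable (Spec_games game_condition playing_field out) := by unfold Spec_games; infer_instance

-- ===== CLAIM (what is proved, stated in full; the proofs are below) =====
def Claim_equal_games : Prop := ∀ (game_condition : Int) (playing_field : String), Dom_games game_condition playing_field → Pre_games game_condition playing_field → Spec_games game_condition playing_field (games game_condition playing_field)

-- ===== LEMMAS AND PROOFS =====

-- two nodup lists with the same members have the same countP
theorem pv_countP_eq_of_mem_iff {α : Type} [DecidableEq α] (p : α → Bool)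
    {L M : List α} (hL : L.Nodup) (hM : M.Nodup) (h : ∀ x, x ∈ L ↔ x ∈ M) :
    L.countP p = M.countP p := by
  have hperm : L.Perm M := by
    refine List.perm_of_nodup_nodup_toFinset_eq hL hM ?_
    ext x; simp [h x]
  exact hperm.countP_eq p

-- a predicate false at c ignores c: countP over ofList (c :: rest) = countP over ofList rest
theorem pv_countP_ofList_cons_false {α : Type} [DecidableEq α] (p : α → Bool) (c : α)
    (rest : List α) (hp : p c = false) :
    (PySem.Set.ofList (c :: rest)).countP p = (PySem.Set.ofList rest).countP p := by
  have h1 : ∀ (X : List α), X.countP p = (X.filter (fun x => x ≠ c)).countP p := by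
    intro X
    rw [List.countP_filter]
    refine (List.countP_congr ?_).symm
    intro x _
    by_cases hx : x = c
    · subst hx; simp [hp]
    · simp [hx]
  rw [h1, h1 (PySem.Set.ofList rest)]
  refine pv_countP_eq_of_mem_iff p ?_ ?_ ?_
  · exact (PySem.Set.nodup_ofList _).filter _
  · exact (PySem.Set.nodup_ofList _).filter _
  · intro x
    simp only [List.mem_filter, PySem.Set.mem_ofList, List.mem_cons, decide_eq_true_eq]
    constructor
    · rintro ⟨h | h, hne⟩
      · exact absurd h hne
      · exact ⟨h, hne⟩
    · rintro ⟨h, hne⟩; exact ⟨Or.inr h, hne⟩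

-- extract the element ch (present, nodup list): countP p L = [p ch] + countP (p ∧ ≠ ch) L
theorem pv_countP_extract {α : Type} [DecidableEq α] (p : α → Bool) (ch : α)
    {L : List α} (hL : L.Nodup) (hch : ch ∈ L) :
    (L.countP p : Int)
      = (if p ch then 1 else 0) + (L.countP (fun k => p k && k ≠ ch) : Int) := by
  have hsplit : ∀ (M : List α), M.countP p
      = M.countP (fun k => p k && k = ch) + M.countP (fun k => p k && k ≠ ch) := by
    intro M
    induction M with
    | nil => simp
    | cons a t ih =>
        by_cases hpa : p a <;> by_cases hac : a = ch <;>
          simp [List.countP_cons, hpa, hac, ih] <;> omega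
  have h2 : L.countP (fun k => p k && k = ch) = if p ch then 1 else 0 := by
    by_cases hp : p ch
    · have he : L.countP (fun k => p k && k = ch) = L.count ch := by
        unfold List.count
        apply List.countP_congr
        intro x _
        by_cases hx : x = ch
        · subst hx; simp [hp]
        · simp [hx]
      rw [he, List.count_eq_one_of_mem hL hch]
      simp [hp]
    · have he : L.countP (fun k => p k && k = ch) = 0 := by
        refine List.countP_eq_zero.mpr ?_
        intro x _
        by_cases hx : x = ch
        · subst hx; simp [hp]
        · simp [hx]
      simp [he, hp]
  rw [hsplit L, h2]
  by_cases hp : p ch <;> simp [hp]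

-- main invariant of the scan loop
theorem pv_gamesLoop_spec (limit : Int) (cur : Char) (run res : Int) (s : List Char)
    (hs : s.Pairwise (· ≤ ·)) (hcur : ∀ x ∈ s, cur ≤ x) :
    gamesLoop limit cur run res s
      = res + (if run + (s.count cur : Int) ≤ limit then 1 else 0)
        + ((PySem.Set.ofList s).countP
            (fun k => decide ((s.count k : Int) ≤ limit) && k ≠ cur) : Int) := by
  induction s generalizing cur run res with
  | nil =>
      simp [gamesLoop, PySem.Set.ofList]
      split_ifs <;> ring
  | cons ch rest ih =>
      have hrest : rest.Pairwise (· ≤ ·) := hs.of_cons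
      have hch : ∀ x ∈ rest, ch ≤ x := fun x hx => List.rel_of_pairwise_cons hs hx
      by_cases he : ch = cur
      · subst he
        rw [show gamesLoop limit ch run res (ch :: rest)
              = gamesLoop limit ch (run + 1) res rest by simp [gamesLoop]]
        rw [ih ch (run + 1) res hrest hch]
        have hcnt : ((ch :: rest).count ch : Int) = (rest.count ch : Int) + 1 := by
          simp [List.count_cons]
        have hothers :
            ((PySem.Set.ofList (ch :: rest)).countP
              (fun k => decide (((ch :: rest).count k : Int) ≤ limit) && k ≠ ch))
            = ((PySem.Set.ofList rest).countP
              (fun k => decide ((rest.count k : Int) ≤ limit) && k ≠ ch)) := by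
          rw [pv_countP_ofList_cons_false _ ch rest (by simp)]
          apply List.countP_congr
          intro x hx
          by_cases hxc : x = ch
          · simp [hxc]
          · have hcx : ch ≠ x := fun h => hxc h.symm
            have : (ch :: rest).count x = rest.count x := by
              simp [List.count_cons, hxc, hcx]
            simp [this, hxc]
        rw [hothers, hcnt]
        have : run + ((rest.count ch : Int) + 1) = run + 1 + (rest.count ch : Int) := by ring
        rw [this]
      · -- ch ≠ cur: cur is strictly below everything in ch :: rest
        have hlt : cur < ch := lt_of_le_of_ne (hcur ch (by simp)) (fun h => he h.symm)
        have hnotmem : cur ∉ ch :: rest := by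
          intro hmem
          rcases List.mem_cons.mp hmem with h | h
          · exact absurd h (ne_of_gt hlt).symm
          · exact absurd rfl (ne_of_lt (lt_of_lt_of_le hlt (hch cur h)))
        have hcnt0 : ((ch :: rest).count cur : Int) = 0 := by
          simp [List.count_eq_zero_of_not_mem hnotmem]
        rw [show gamesLoop limit cur run res (ch :: rest)
              = gamesLoop limit ch 1 (if run ≤ limit then res + 1 else res) rest by
            simp [gamesLoop, he]]
        rw [ih ch 1 _ hrest hch]
        have hchmem : ch ∈ PySem.Set.ofList (ch :: rest) :=
          (PySem.Set.mem_ofList _ _).mpr (by simp)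
        have hextract := pv_countP_extract
          (fun k => decide (((ch :: rest).count k : Int) ≤ limit) && k ≠ cur) ch
          (PySem.Set.nodup_ofList (ch :: rest)) hchmem
        have hcurne : cur ∉ rest := fun h => hnotmem (List.mem_cons_of_mem _ h)
        have hothers :
            ((PySem.Set.ofList (ch :: rest)).countP
              (fun k => (decide (((ch :: rest).count k : Int) ≤ limit) && k ≠ cur) && k ≠ ch))
            = ((PySem.Set.ofList rest).countP
              (fun k => decide ((rest.count k : Int) ≤ limit) && k ≠ ch)) := by
          rw [pv_countP_ofList_cons_false _ ch rest (by simp)]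
          apply List.countP_congr
          intro x hx
          have hxmem : x ∈ rest := (PySem.Set.mem_ofList _ _).mp hx
          by_cases hxc : x = ch
          · simp [hxc]
          · have hcx : ch ≠ x := fun h => hxc h.symm
            have hxcur : x ≠ cur := fun h => hcurne (h ▸ hxmem)
            have : (ch :: rest).count x = rest.count x := by
              simp [List.count_cons, hxc, hcx]
            simp [this, hxc, hxcur]
        rw [hothers] at hextract
        rw [hextract]
        have hcc : ((ch :: rest).count ch : Int) = 1 + (rest.count ch : Int) := by
          simp [List.count_cons]; ring
        have hcr0 : ((rest.count cur : Nat) : Int) = 0 := by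
          simp [List.count_eq_zero_of_not_mem hcurne]
        by_cases h1 : run ≤ limit <;> by_cases h2 : ((rest.count ch : Nat) : Int) < limit <;>
          simp [h1, h2, he, hcnt0, hcc, hcr0] <;> omega

-- A's fold equals a countP over the distinct characters
theorem pv_games_eq_countP (g : Int) (l : List Char) :
    (PySem.Dict.counter l).values.foldl
        (fun result value => if value ≤ g * 2 then result + 1 else result) 0
      = ((PySem.Set.ofList l).countP (fun k => decide ((l.count k : Int) ≤ g * 2)) : Int) := by
  have hv : (PySem.Dict.counter l).values
      = (PySem.Set.ofList l).map (fun k => (l.count k : Int)) := by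
    show (PySem.Dict.counter l).items.map (·.2) = _
    rw [PySem.Dict.items_counter]
    simp [List.map_map, Function.comp]
  rw [hv, List.foldl_map, PySem.List.foldl_ite_add_one]
  simp

-- countP of the "count ≤ limit" predicate is invariant under permutation of the base list
theorem pv_countP_ofList_perm (limit : Int) {s l : List Char} (hp : s.Perm l) :
    ((PySem.Set.ofList s).countP (fun k => decide ((s.count k : Int) ≤ limit)))
      = ((PySem.Set.ofList l).countP (fun k => decide ((l.count k : Int) ≤ limit))) := by
  have h1 : ((PySem.Set.ofList s).countP (fun k => decide ((s.count k : Int) ≤ limit)))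
      = ((PySem.Set.ofList s).countP (fun k => decide ((l.count k : Int) ≤ limit))) := by
    apply List.countP_congr
    intro x _
    simp [hp.count_eq]
  rw [h1]
  refine pv_countP_eq_of_mem_iff _ (PySem.Set.nodup_ofList s) (PySem.Set.nodup_ofList l) ?_
  intro x
  simp [PySem.Set.mem_ofList, hp.mem_iff]

-- ===== VERDICT (by name: the statement is the Claim_ definition above) =====
theorem games_spec : Claim_equal_games := by
  intro g pf _ hpre
  unfold Spec_games games games_alt
  have hne : ¬ (pf = "") := hpre
  simp only [if_neg hne]
  set l := pf.toList with hl
  set s := PySem.List.sorted l (fun c => c) false with hsdef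
  have hnil : l ≠ [] := by
    intro h
    exact hne (String.toList_eq_nil_iff.mp h)
  have hsne : s ≠ [] := by
    rw [hsdef, Ne, PySem.List.sorted_eq_nil_iff]; exact hnil
  obtain ⟨c0, t, hst⟩ : ∃ c0 t, s = c0 :: t := by
    cases h : s with
    | nil => exact absurd h hsne
    | cons a b => exact ⟨a, b, rfl⟩
  rw [pv_games_eq_countP]
  have hs_pair : s.Pairwise (· ≤ ·) := PySem.List.sorted_pairwise l (fun c => c)
  have hperm : s.Perm l := PySem.List.sorted_perm l (fun c => c) false
  have hmin : ∀ x ∈ s, c0 ≤ x := by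
    intro x hx
    exact PySem.List.key_head_sorted_le l (fun c => c) hst x (hperm.mem_iff.mp hx)
  have hloop := pv_gamesLoop_spec (g * 2) c0 0 0 s hs_pair hmin
  have hc0mem : c0 ∈ PySem.Set.ofList s :=
    (PySem.Set.mem_ofList _ _).mpr (by rw [hst]; simp)
  have hextract := pv_countP_extract
    (fun k => decide ((s.count k : Int) ≤ g * 2)) c0
    (PySem.Set.nodup_ofList s) hc0mem
  rw [hst] at hloop ⊢
  show _ = gamesLoop (g * 2) c0 0 0 (c0 :: t)
  rw [hloop]
  rw [← pv_countP_ofList_perm (g * 2) hperm]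
  rw [hst] at hextract ⊢
  rw [hextract]
  by_cases hc : ((c0 :: t).count c0 : Int) ≤ g * 2 <;> simp [hc]
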